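-- pv_equiv track=rewrite | github.com/WillTheFoolLearn/advent2024 | day_12/main.py | peri_count
-- ===== SOURCE A (Python) =====
-- def peri_count(type_set):
--     type_list = list(type_set)
--     total = 0
--     for i in range(len(type_list) - 1):
--         for j in range(i + 1, len(type_list)):
--             if (type_list[j][0] - 1, type_list[j][1]) == type_list[i] or (type_list[j][0] + 1, type_list[j][1]) == type_list[i] or (type_list[j][0], type_list[j][1] - 1) == type_list[i] or (type_list[j][0], type_list[j][1] + 1) == type_list[i]:
--                 total += 1
--
--     return total
-- ===== SOURCE B (Python) =====
-- def peri_count(type_set):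
--     counts = {}
--     for p in type_set:
--         counts[p] = counts.get(p, 0) + 1
--     total = 0
--     for (a, b), c in counts.items():
--         total += c * (counts.get((a + 1, b), 0) + counts.get((a, b + 1), 0))
--     return total
-- ===== Notes on version B (the rewrite author's own statement) =====
-- stated objective: faster
-- what changed: Replaces A's quadratic all-pairs scan with one pass that builds a frequency dict and, for each distinct point, counts occurrences of its right and upper neighbours, so each adjacent unordered pair is counted exactly once.
import Mathlib
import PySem

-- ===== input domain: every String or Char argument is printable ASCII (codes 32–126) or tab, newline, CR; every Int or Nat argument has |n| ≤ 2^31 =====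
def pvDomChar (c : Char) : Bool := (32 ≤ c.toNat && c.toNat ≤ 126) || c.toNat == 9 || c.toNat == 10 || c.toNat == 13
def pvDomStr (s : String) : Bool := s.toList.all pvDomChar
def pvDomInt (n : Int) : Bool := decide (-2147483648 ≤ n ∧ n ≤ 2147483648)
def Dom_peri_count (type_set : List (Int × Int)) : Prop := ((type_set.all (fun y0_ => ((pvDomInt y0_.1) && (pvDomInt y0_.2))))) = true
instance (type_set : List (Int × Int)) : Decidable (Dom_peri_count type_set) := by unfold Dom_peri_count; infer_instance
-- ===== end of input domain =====

-- B replaces A's quadratic all-pairs scan with a linear frequency-dict pass counting right/upper neighbours (objective: faster).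

-- ===== PORT A =====
def peri_count (type_set : List (Int × Int)) : Int :=
  let type_list := type_set
  (PySem.List.pyRange 0 (PySem.List.len type_list - 1) 1).foldl (fun total i =>
    (PySem.List.pyRange (i + 1) (PySem.List.len type_list) 1).foldl (fun total j =>
      let tj := PySem.List.pyGetD type_list j (0, 0)
      let ti := PySem.List.pyGetD type_list i (0, 0)
      if (tj.1 - 1, tj.2) = ti ∨ (tj.1 + 1, tj.2) = ti ∨ (tj.1, tj.2 - 1) = ti ∨ (tj.1, tj.2 + 1) = ti
      then total + 1 else total) total) 0

-- ===== PORT B =====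
def peri_count_alt (type_set : List (Int × Int)) : Int :=
  let counts : PySem.Dict (Int × Int) Int :=
    type_set.foldl (fun d p => d.insert p (d.getD p 0 + 1)) PySem.Dict.empty
  counts.items.foldl (fun total kc =>
    total + kc.2 * (counts.getD (kc.1.1 + 1, kc.1.2) 0 + counts.getD (kc.1.1, kc.1.2 + 1) 0)) 0

-- ===== PRECONDITION & SPEC =====
def Spec_peri_count (type_set : List (Int × Int)) (out : Int) : Prop := out = peri_count_alt type_set
instance (type_set : List (Int × Int)) (out : Int) : Decidable (Spec_peri_count type_set out) := by unfold Spec_peri_count; infer_instance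

-- ===== CLAIM (what is proved, stated in full; the proofs are below) =====
def Claim_equal_peri_count : Prop := ∀ (type_set : List (Int × Int)), Dom_peri_count type_set → Spec_peri_count type_set (peri_count type_set)

-- ===== LEMMAS AND PROOFS =====

-- q is an orthogonal neighbour of x (A's branch condition)
def pvAdj (x q : Int × Int) : Bool :=
  decide ((q.1 - 1, q.2) = x ∨ (q.1 + 1, q.2) = x ∨ (q.1, q.2 - 1) = x ∨ (q.1, q.2 + 1) = x)

-- A's double loop as a structural recursion: head against tail, then recurse
def pvPairs : List (Int × Int) → Int
  | [] => 0
  | x :: xs => (xs.countP (pvAdj x) : Int) + pvPairs xs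

-- number of right/upper neighbours of x inside l
def pvNb (x : Int × Int) (l : List (Int × Int)) : Int :=
  (l.count (x.1 + 1, x.2) : Int) + (l.count (x.1, x.2 + 1) : Int)

lemma pvInner (l : List (Int × Int)) (k : Nat) (t : Int) (x : Int × Int) :
    (PySem.List.pyRange ((k : Int) + 1) (PySem.List.len l) 1).foldl (fun total j =>
      if ((PySem.List.pyGetD l j ((0:Int), (0:Int))).1 - 1, (PySem.List.pyGetD l j ((0:Int), (0:Int))).2) = x
        ∨ ((PySem.List.pyGetD l j ((0:Int), (0:Int))).1 + 1, (PySem.List.pyGetD l j ((0:Int), (0:Int))).2) = x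
        ∨ ((PySem.List.pyGetD l j ((0:Int), (0:Int))).1, (PySem.List.pyGetD l j ((0:Int), (0:Int))).2 - 1) = x
        ∨ ((PySem.List.pyGetD l j ((0:Int), (0:Int))).1, (PySem.List.pyGetD l j ((0:Int), (0:Int))).2 + 1) = x
      then total + 1 else total) t
    = t + ((l.drop (k + 1)).countP (pvAdj x) : Int) := by
  have h : ((k : Int) + 1) = ((k + 1 : Nat) : Int) := by push_cast; ring
  rw [h, PySem.List.foldl_pyRange_pyGetD l ((0:Int), (0:Int))
        (fun total tj => if (tj.1 - 1, tj.2) = x ∨ (tj.1 + 1, tj.2) = x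
            ∨ (tj.1, tj.2 - 1) = x ∨ (tj.1, tj.2 + 1) = x then total + 1 else total) t
        (by positivity)]
  rw [PySem.List.foldl_ite_add_one]
  simp only [Int.toNat_natCast]
  refine congrArg (fun c : Nat => t + (c : Int)) ?_
  refine List.countP_congr ?_
  intro q _
  simp [pvAdj]

lemma pvA_sum (l : List (Int × Int)) :
    peri_count l
    = ((List.range l.length).map (fun k =>
        ((l.drop (k + 1)).countP (pvAdj (l.getD k (0, 0))) : Int))).sum := by
  show (PySem.List.pyRange 0 (PySem.List.len l - 1) 1).foldl (fun total i =>
      (PySem.List.pyRange (i + 1) (PySem.List.len l) 1).foldl (fun total j =>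
        let tj := PySem.List.pyGetD l j (0, 0)
        let ti := PySem.List.pyGetD l i (0, 0)
        if (tj.1 - 1, tj.2) = ti ∨ (tj.1 + 1, tj.2) = ti ∨ (tj.1, tj.2 - 1) = ti ∨ (tj.1, tj.2 + 1) = ti
        then total + 1 else total) total) 0
      = ((List.range l.length).map (fun k =>
        ((l.drop (k + 1)).countP (pvAdj (l.getD k (0, 0))) : Int))).sum
  have hext : (PySem.List.pyRange 0 (PySem.List.len l - 1) 1).foldl (fun total i =>
      (PySem.List.pyRange (i + 1) (PySem.List.len l) 1).foldl (fun total j =>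
        let tj := PySem.List.pyGetD l j (0, 0)
        let ti := PySem.List.pyGetD l i (0, 0)
        if (tj.1 - 1, tj.2) = ti ∨ (tj.1 + 1, tj.2) = ti ∨ (tj.1, tj.2 - 1) = ti ∨ (tj.1, tj.2 + 1) = ti
        then total + 1 else total) total) (0 : Int)
      = (PySem.List.pyRange 0 (PySem.List.len l) 1).foldl (fun total i =>
      (PySem.List.pyRange (i + 1) (PySem.List.len l) 1).foldl (fun total j =>
        let tj := PySem.List.pyGetD l j (0, 0)
        let ti := PySem.List.pyGetD l i (0, 0)
        if (tj.1 - 1, tj.2) = ti ∨ (tj.1 + 1, tj.2) = ti ∨ (tj.1, tj.2 - 1) = ti ∨ (tj.1, tj.2 + 1) = ti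
        then total + 1 else total) total) (0 : Int) := by
    cases l with
    | nil => rfl
    | cons y ys =>
        have h1 : (0:Int) ≤ PySem.List.len (y :: ys) - 1 := by
          simp only [PySem.List.len_eq, List.length_cons]; push_cast; omega
        have h2 : PySem.List.pyRange 0 (PySem.List.len (y :: ys)) 1
            = PySem.List.pyRange 0 (PySem.List.len (y :: ys) - 1) 1 ++ [PySem.List.len (y :: ys) - 1] := by
          conv_lhs => rw [show PySem.List.len (y :: ys) = (PySem.List.len (y :: ys) - 1) + 1 by ring]
          exact PySem.List.pyRange_one_succ_right h1
        rw [h2, List.foldl_append]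
        simp only [List.foldl_cons, List.foldl_nil]
        rw [show PySem.List.pyRange (PySem.List.len (y :: ys) - 1 + 1) (PySem.List.len (y :: ys)) 1 = []
            from PySem.List.pyRange_one_eq_nil (by omega)]
        rfl
  refine hext.trans ?_
  rw [PySem.List.pyRange_one 0 (PySem.List.len l)]
  rw [List.foldl_map]
  have hlen : ((PySem.List.len l) - 0).toNat = l.length := by
    simp [PySem.List.len_eq]
  rw [hlen]
  refine Eq.trans (PySem.List.foldl_congr_mem (List.range l.length) _
      (fun (t : Int) (k : Nat) => t + ((l.drop (k + 1)).countP (pvAdj (l.getD k (0, 0))) : Int)) 0 ?_) ?_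
  · intro t k hk
    simp only [zero_add, PySem.List.pyGetD_natCast]
    exact pvInner l k t (l.getD k (0, 0))
  · refine Eq.trans (PySem.List.foldl_add _ _ _) ?_
    simp

lemma pvSum_pairs (l : List (Int × Int)) :
    ((List.range l.length).map (fun k =>
        ((l.drop (k + 1)).countP (pvAdj (l.getD k (0, 0))) : Int))).sum = pvPairs l := by
  induction l with
  | nil => simp [pvPairs]
  | cons x xs ih =>
      simp only [List.length_cons]
      rw [List.range_succ_eq_map]
      simp only [List.map_cons, List.map_map, List.sum_cons]
      have h : ((List.range xs.length).map ((fun k =>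
          (((x :: xs).drop (k + 1)).countP (pvAdj ((x :: xs).getD k (0, 0))) : Int)) ∘ Nat.succ))
          = (List.range xs.length).map (fun k =>
          ((xs.drop (k + 1)).countP (pvAdj (xs.getD k (0, 0))) : Int)) := by
        apply List.map_congr_left
        intro k _
        simp [Function.comp, List.getD]
      rw [h, ih]
      simp [pvPairs]

lemma pvShift1 (x : Int × Int) (xs : List (Int × Int)) :
    (xs.countP (fun y => (y.1 + 1, y.2) == x) : Int) = (xs.count (x.1 - 1, x.2) : Int) := by
  induction xs with
  | nil => simp
  | cons y ys ih =>
      simp only [List.countP_cons, List.count_cons]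
      push_cast
      rw [← ih]
      rcases x with ⟨c, d⟩; rcases y with ⟨a, b⟩
      simp only [beq_iff_eq, Prod.mk.injEq]
      split_ifs <;> omega

lemma pvShift2 (x : Int × Int) (xs : List (Int × Int)) :
    (xs.countP (fun y => (y.1, y.2 + 1) == x) : Int) = (xs.count (x.1, x.2 - 1) : Int) := by
  induction xs with
  | nil => simp
  | cons y ys ih =>
      simp only [List.countP_cons, List.count_cons]
      push_cast
      rw [← ih]
      rcases x with ⟨c, d⟩; rcases y with ⟨a, b⟩
      simp only [beq_iff_eq, Prod.mk.injEq]
      split_ifs <;> omega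

lemma pvKey (x : Int × Int) (xs : List (Int × Int)) :
    (xs.countP (pvAdj x) : Int)
    = (xs.count (x.1 + 1, x.2) : Int) + (xs.count (x.1 - 1, x.2) : Int)
      + (xs.count (x.1, x.2 + 1) : Int) + (xs.count (x.1, x.2 - 1) : Int) := by
  induction xs with
  | nil => simp
  | cons y ys ih =>
      simp only [List.countP_cons, List.count_cons]
      push_cast
      rw [ih]
      rcases x with ⟨c, d⟩; rcases y with ⟨a, b⟩
      simp only [pvAdj, beq_iff_eq, Prod.mk.injEq, decide_eq_true_eq]
      split_ifs <;> omega

lemma pvNb_cons_self (x : Int × Int) (xs : List (Int × Int)) :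
    pvNb x (x :: xs) = pvNb x xs := by
  rcases x with ⟨a, b⟩
  simp only [pvNb, List.count_cons, beq_iff_eq, Prod.mk.injEq]
  split_ifs <;> push_cast <;> omega

lemma pvTailSum (x : Int × Int) (xs : List (Int × Int)) :
    (xs.map (fun y => pvNb y (x :: xs))).sum
    = (xs.map (fun y => pvNb y xs)).sum + (xs.count (x.1 - 1, x.2) : Int) + (xs.count (x.1, x.2 - 1) : Int) := by
  have h : ∀ y : Int × Int, pvNb y (x :: xs)
      = pvNb y xs + ((if ((y.1 + 1, y.2) == x) = true then (1:Int) else 0)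
                     + (if ((y.1, y.2 + 1) == x) = true then (1:Int) else 0)) := by
    intro y
    simp only [pvNb, List.count_cons]
    push_cast
    rw [Bool.beq_comm (a := x) (b := (y.1 + 1, y.2)), Bool.beq_comm (a := x) (b := (y.1, y.2 + 1))]
    ring
  calc (xs.map (fun y => pvNb y (x :: xs))).sum
      = (xs.map (fun y => pvNb y xs + ((if ((y.1 + 1, y.2) == x) = true then (1:Int) else 0)
                     + (if ((y.1, y.2 + 1) == x) = true then (1:Int) else 0)))).sum := by
        exact congrArg _ (List.map_congr_left (fun y _ => h y))
    _ = (xs.map (fun y => pvNb y xs)).sum + ((xs.map (fun y => if ((y.1 + 1, y.2) == x) = true then (1:Int) else 0)).sum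
          + (xs.map (fun y => if ((y.1, y.2 + 1) == x) = true then (1:Int) else 0)).sum) := by
        rw [← PySem.List.sum_map_add_int xs (fun y => if ((y.1 + 1, y.2) == x) = true then (1:Int) else 0)
              (fun y => if ((y.1, y.2 + 1) == x) = true then (1:Int) else 0)]
        exact PySem.List.sum_map_add_int xs _ _
    _ = (xs.map (fun y => pvNb y xs)).sum + (xs.count (x.1 - 1, x.2) : Int) + (xs.count (x.1, x.2 - 1) : Int) := by
        rw [PySem.List.sum_map_ite_one_zero, PySem.List.sum_map_ite_one_zero, pvShift1, pvShift2]
        ring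

lemma pvPairs_SE (l : List (Int × Int)) :
    pvPairs l = (l.map (fun x => pvNb x l)).sum := by
  induction l with
  | nil => simp [pvPairs]
  | cons x xs ih =>
      simp only [List.map_cons, List.sum_cons]
      rw [pvNb_cons_self, pvTailSum, ← ih]
      simp only [pvPairs]
      rw [pvKey]
      simp only [pvNb]
      ring

lemma pvIndicator (g : Int × Int → Int) (x : Int × Int) :
    ∀ (d : List (Int × Int)), d.Nodup → x ∈ d →
    (d.map (fun p => (if (p == x) = true then (1:Int) else 0) * g p)).sum = g x := by
  intro d
  induction d with
  | nil => intro _ hx; simp at hx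
  | cons y ys ih =>
      intro hd hx
      rcases List.nodup_cons.mp hd with ⟨hny, hnd⟩
      simp only [List.map_cons, List.sum_cons]
      rcases List.mem_cons.mp hx with h | h
      · subst h
        have hz : (ys.map (fun p => (if (p == x) = true then (1:Int) else 0) * g p)).sum = 0 := by
          apply List.sum_eq_zero
          intro v hv
          rcases List.mem_map.mp hv with ⟨p, hp, rfl⟩
          have hne : p ≠ x := fun hpx => hny (hpx ▸ hp)
          simp [hne]
        rw [hz]
        simp
      · have hyx : y ≠ x := fun hyx => hny (hyx ▸ h)
        simp only [beq_eq_false_iff_ne.mpr hyx, Bool.false_eq_true, if_false, zero_mul, zero_add]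
        exact ih hnd h

lemma pvCollapse (g : Int × Int → Int) :
    ∀ (l d : List (Int × Int)), d.Nodup → (∀ x ∈ l, x ∈ d) →
    (d.map (fun p => (l.count p : Int) * g p)).sum = (l.map g).sum := by
  intro l
  induction l with
  | nil => intro d _ _; simp
  | cons x xs ih =>
      intro d hd hsub
      have hx : x ∈ d := hsub x List.mem_cons_self
      have h : ∀ p : Int × Int, ((x :: xs).count p : Int) * g p
          = (xs.count p : Int) * g p + (if (p == x) = true then (1:Int) else 0) * g p := by
        intro p
        rw [List.count_cons, Bool.beq_comm (a := x) (b := p)]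
        push_cast
        ring
      calc (d.map (fun p => ((x :: xs).count p : Int) * g p)).sum
          = (d.map (fun p => (xs.count p : Int) * g p + (if (p == x) = true then (1:Int) else 0) * g p)).sum := by
            exact congrArg _ (List.map_congr_left (fun p _ => h p))
        _ = (d.map (fun p => (xs.count p : Int) * g p)).sum
            + (d.map (fun p => (if (p == x) = true then (1:Int) else 0) * g p)).sum := by
            exact PySem.List.sum_map_add_int d _ _
        _ = (xs.map g).sum + g x := by
            rw [ih d hd (fun y hy => hsub y (List.mem_cons_of_mem x hy)), pvIndicator g x d hd hx]
        _ = ((x :: xs).map g).sum := by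
            simp only [List.map_cons, List.sum_cons]
            ring

lemma pvB_sum (l : List (Int × Int)) :
    peri_count_alt l
    = ((PySem.Set.ofList l).map (fun p => (l.count p : Int) * pvNb p l)).sum := by
  show (let counts : PySem.Dict (Int × Int) Int :=
      l.foldl (fun d p => d.insert p (d.getD p 0 + 1)) PySem.Dict.empty
    counts.items.foldl (fun total kc =>
      total + kc.2 * (counts.getD (kc.1.1 + 1, kc.1.2) 0 + counts.getD (kc.1.1, kc.1.2 + 1) 0)) 0)
    = ((PySem.Set.ofList l).map (fun p => (l.count p : Int) * pvNb p l)).sum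
  simp only [PySem.Dict.foldl_insert_getD_add_one_eq_counter]
  rw [PySem.List.foldl_add ((PySem.Dict.counter l).items)
      (fun kc => kc.2 * ((PySem.Dict.counter l).getD (kc.1.1 + 1, kc.1.2) 0
        + (PySem.Dict.counter l).getD (kc.1.1, kc.1.2 + 1) 0)) 0]
  rw [PySem.Dict.items_counter, List.map_map]
  rw [zero_add]
  apply congrArg
  apply List.map_congr_left
  intro p _
  simp only [Function.comp]
  rw [PySem.Dict.getD_counter, PySem.Dict.getD_counter]
  rfl

-- ===== VERDICT (by name: the statement is the Claim_ definition above) =====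
theorem peri_count_spec : Claim_equal_peri_count := by
  intro l _
  unfold Spec_peri_count
  rw [pvA_sum, pvSum_pairs, pvPairs_SE, pvB_sum,
      pvCollapse (fun x => pvNb x l) l (PySem.Set.ofList l) (PySem.Set.nodup_ofList l)
        (fun x hx => (PySem.Set.mem_ofList l x).mpr hx)]
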